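-- pv_equiv track=rewrite | github.com/FITM-KMUTNB/TMRS | Library/Centroid.py | _sorted_hop
-- ===== SOURCE A (Python) =====
-- import operator
--
-- def _sorted_hop(centroid, targethop):
--     centroidsortedbyhop = dict()
--     targethop = dict(sorted(targethop.items(), key=operator.itemgetter(1)))
--     minhopkey = min(targethop, key=targethop.get)
--     minhop = targethop[minhopkey]
--     tempcentroidhop = dict()
--
--     for target in targethop:
--
--         if minhop < targethop[target]:
--             minhop = targethop[target]
--             tempcentroidhop = dict(sorted(tempcentroidhop.items(), key=operator.itemgetter(1)))
--             for temp in tempcentroidhop: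
--                 centroidsortedbyhop[temp] = tempcentroidhop[temp]
--             tempcentroidhop = dict()
--
--         tempcentroidhop[target] = centroid[target]
--
--     return centroidsortedbyhop
-- ===== SOURCE B (Python) =====
-- def _sorted_hop(centroid, targethop):
--     # one stable sort by the composite key (hop, centroid value) ranks all targets;
--     # dropping the max-hop targets then yields the result directly, with no grouping
--     maxhop = max(targethop.values())
--     ranked = sorted(targethop.items(), key=lambda p: (p[1], centroid[p[0]]))
--     return {t: centroid[t] for t, h in ranked if h != maxhop}
-- ===== Notes on version B (the rewrite author's own statement) =====
-- stated objective: simpler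
-- what changed: B replaces A's grouping machinery (hop-sort, flush-on-hop-change temp dicts, per-group re-sorts) by ONE stable sort under the composite key (hop, centroid value) followed by a comprehension dropping the max-hop targets; stability of the composite sort makes any grouping unnecessary.
import Mathlib
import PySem

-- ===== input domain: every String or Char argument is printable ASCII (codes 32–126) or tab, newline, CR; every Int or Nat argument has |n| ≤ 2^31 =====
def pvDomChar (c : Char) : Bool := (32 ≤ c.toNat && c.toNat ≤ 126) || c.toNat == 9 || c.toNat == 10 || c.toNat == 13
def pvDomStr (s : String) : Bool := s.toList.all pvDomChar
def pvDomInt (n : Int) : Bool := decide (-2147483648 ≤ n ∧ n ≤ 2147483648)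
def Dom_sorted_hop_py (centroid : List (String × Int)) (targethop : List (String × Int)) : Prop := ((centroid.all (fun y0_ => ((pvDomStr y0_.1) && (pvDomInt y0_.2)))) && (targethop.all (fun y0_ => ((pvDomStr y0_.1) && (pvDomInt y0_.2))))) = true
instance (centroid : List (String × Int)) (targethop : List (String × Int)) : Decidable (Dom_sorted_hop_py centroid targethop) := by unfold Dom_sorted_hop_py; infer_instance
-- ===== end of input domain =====

-- B replaces A's grouping (hop-sort, flush-on-hop-change temp dicts, per-group re-sorts)
-- by one stable sort under the composite key (hop, centroid value) plus a max-hop filter (simpler).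


-- ===== PORT A =====
-- the body of A's `for target in targethop` loop; state = (minhop, tempcentroidhop, centroidsortedbyhop)
def pvStepA (centroidD th : PySem.Dict String Int)
    (st : Int × PySem.Dict String Int × PySem.Dict String Int) (target : String) :
    Int × PySem.Dict String Int × PySem.Dict String Int :=
  if st.1 < th.getD target 0 then
    -- tempcentroidhop = dict(sorted(tempcentroidhop.items(), key=itemgetter(1)))
    let temp' := PySem.Dict.ofList (PySem.List.sorted st.2.1.items (fun p => p.2))
    -- for temp in tempcentroidhop: centroidsortedbyhop[temp] = tempcentroidhop[temp]
    let csbh' := temp'.keys.foldl (fun r temp => r.insert temp (temp'.getD temp 0)) st.2.2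
    (th.getD target 0, PySem.Dict.empty.insert target (centroidD.getD target 0), csbh')
  else
    (st.1, st.2.1.insert target (centroidD.getD target 0), st.2.2)

def sorted_hop_py (centroid : List (String × Int)) (targethop : List (String × Int)) : List (String × Int) :=
  let centroidD := PySem.Dict.ofList centroid
  -- targethop = dict(sorted(targethop.items(), key=operator.itemgetter(1)))
  let th := PySem.Dict.ofList (PySem.List.sorted (PySem.Dict.ofList targethop).items (fun p => p.2))
  match PySem.List.min? th.keys (fun k => th.getD k 0) with
  | none => []  -- Python: min() raises ValueError on an empty dict; excluded by Pre_
  | some minhopkey =>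
    let minhop := th.getD minhopkey 0
    (th.keys.foldl (pvStepA centroidD th) (minhop, PySem.Dict.empty, PySem.Dict.empty)).2.2.items

-- ===== PORT B =====
def sorted_hop_py_alt (centroid : List (String × Int)) (targethop : List (String × Int)) : List (String × Int) :=
  let cd := PySem.Dict.ofList centroid
  let th := PySem.Dict.ofList targethop
  -- maxhop = max(targethop.values())
  match PySem.List.max? th.values (fun v => v) with
  | none => []  -- Python: max() raises ValueError on an empty dict; excluded by Pre_
  | some maxhop =>
    -- ranked = sorted(targethop.items(), key=lambda p: (p[1], centroid[p[0]]))
    let ranked := PySem.List.sorted2 th.items (fun p => p.2) (fun p => cd.getD p.1 0)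
    -- {t: centroid[t] for t, h in ranked if h != maxhop}
    (ranked.foldl
      (fun r p => if p.2 != maxhop then r.insert p.1 (cd.getD p.1 0) else r)
      PySem.Dict.empty).items

-- ===== PRECONDITION & SPEC =====
-- Pre_ excludes the empty targethop (A's min() raises ValueError) and targets missing from
-- centroid (centroid[target] raises KeyError).
def Pre_sorted_hop_py (centroid : List (String × Int)) (targethop : List (String × Int)) : Prop :=
  targethop ≠ [] ∧ ∀ p ∈ targethop, p.1 ∈ centroid.map Prod.fst
instance (centroid : List (String × Int)) (targethop : List (String × Int)) : Decidable (Pre_sorted_hop_py centroid targethop) := by unfold Pre_sorted_hop_py; infer_instance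

def pvWitness_sorted_hop_py : (List (String × Int)) × (List (String × Int)) :=
  ([("a", 5), ("b", 7), ("c", 3)], [("a", 1), ("c", 1), ("b", 2)])

def Spec_sorted_hop_py (centroid : List (String × Int)) (targethop : List (String × Int)) (out : List (String × Int)) : Prop := out = sorted_hop_py_alt centroid targethop
instance (centroid : List (String × Int)) (targethop : List (String × Int)) (out : List (String × Int)) : Decidable (Spec_sorted_hop_py centroid targethop out) := by unfold Spec_sorted_hop_py; infer_instance

-- ===== CLAIM (what is proved, stated in full; the proofs are below) =====
def Claim_equal_sorted_hop_py : Prop := ∀ (centroid : List (String × Int)) (targethop : List (String × Int)), Dom_sorted_hop_py centroid targethop → Pre_sorted_hop_py centroid targethop → Spec_sorted_hop_py centroid targethop (sorted_hop_py centroid targethop)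

-- ===== LEMMAS AND PROOFS =====

-- (target, centroid[target]) pair view of a (target, hop) item
def pvPair (cd : PySem.Dict String Int) (p : String × Int) : String × Int := (p.1, cd.getD p.1 0)

-- flush a list of (target, value) pairs, sorted by value, into a result dict
def pvFlushM (temp : List (String × Int)) (r : PySem.Dict String Int) : PySem.Dict String Int :=
  (PySem.List.sorted temp (fun q => q.2)).foldl (fun r q => r.insert q.1 q.2) r

-- flush a run of raw (target, hop) items, sorted by centroid value
def pvFlushP (cd : PySem.Dict String Int) (g : List (String × Int)) (r : PySem.Dict String Int) :
    PySem.Dict String Int :=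
  (PySem.List.sorted g (fun p => cd.getD p.1 0)).foldl (fun r p => r.insert p.1 (cd.getD p.1 0)) r

-- common reference: walk the hop-sorted items run by run, flushing every run except the last
def pvSpecL (cd : PySem.Dict String Int) (L : List (String × Int)) (r : PySem.Dict String Int) :
    PySem.Dict String Int :=
  match L with
  | [] => r
  | x :: xs =>
    let rest := xs.dropWhile (fun y => y.2 == x.2)
    if rest.isEmpty then r
    else pvSpecL cd rest (pvFlushP cd (x :: xs.takeWhile (fun y => y.2 == x.2)) r)
termination_by L.length
decreasing_by simpa using Nat.lt_succ_of_le (List.length_dropWhile_le _ _)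

-- A's loop body on a list-valued temp
def pvStepM (cd : PySem.Dict String Int)
    (st : Int × List (String × Int) × PySem.Dict String Int) (p : String × Int) :
    Int × List (String × Int) × PySem.Dict String Int :=
  if st.1 < p.2 then (p.2, [pvPair cd p], pvFlushM st.2.1 st.2.2)
  else (st.1, st.2.1 ++ [pvPair cd p], st.2.2)

-- B's hop-sorted list regrouped: each equal-hop run of a hop-sorted list, sorted by centroid value
def pvRunSort (cd : PySem.Dict String Int) (L : List (String × Int)) : List (String × Int) :=
  match L with
  | [] => []
  | x :: xs =>
    PySem.List.sorted (x :: xs.takeWhile (fun y => y.2 == x.2)) (fun p => cd.getD p.1 0)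
      ++ pvRunSort cd (xs.dropWhile (fun y => y.2 == x.2))
termination_by L.length
decreasing_by simpa using Nat.lt_succ_of_le (List.length_dropWhile_le _ _)

theorem pvInsertBy_map {α β : Type} (f : α → β) (cmp : β → β → Bool) (a : α) (l : List α) :
    PySem.List.insertBy cmp (f a) (l.map f) = (PySem.List.insertBy (fun x y => cmp (f x) (f y)) a l).map f := by
  induction l with
  | nil => rfl
  | cons y ys ih =>
    simp only [List.map_cons, PySem.List.insertBy]
    by_cases h : cmp (f a) (f y) = true
    · simp [h]
    · simp [eq_false_of_ne_true h, ih]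

theorem pvSorted_map {α β : Type} (f : α → β) (key : β → Int) (l : List α) :
    PySem.List.sorted (l.map f) key = (PySem.List.sorted l (fun a => key (f a))).map f := by
  rw [PySem.List.sorted_eq_foldl_insertBy, PySem.List.sorted_eq_foldl_insertBy, List.foldl_map]
  suffices h : ∀ acc : List α, l.foldl (fun acc x => PySem.List.insertBy (fun a b => decide (key a < key b)) (f x) acc) (acc.map f)
      = (l.foldl (fun acc x => PySem.List.insertBy (fun a b => decide (key (f a) < key (f b))) x acc) acc).map f by
    simpa using h []
  induction l with
  | nil => intro acc; rfl
  | cons y ys ih => intro acc; simp only [List.foldl_cons, pvInsertBy_map]; exact ih _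

theorem pvFoldl_map_fst_insert (G : String → Int) (s : List (String × Int))
    (hG : ∀ q ∈ s, G q.1 = q.2) (r : PySem.Dict String Int) :
    (s.map Prod.fst).foldl (fun r k => r.insert k (G k)) r = s.foldl (fun r q => r.insert q.1 q.2) r := by
  induction s generalizing r with
  | nil => rfl
  | cons q s ih =>
    simp only [List.map_cons, List.foldl_cons, hG q (by simp)]
    exact ih (fun q hq => hG q (by simp [hq])) _

theorem pvItems_ofList (ls : List (String × Int)) (h : (ls.map Prod.fst).Nodup) :
    (PySem.Dict.ofList ls).items = ls := by
  have := PySem.Dict.items_foldl_insert_fresh (l := ls) (k := Prod.fst) (v := Prod.snd)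
    (d := (PySem.Dict.empty : PySem.Dict String Int)) (by simp [PySem.Dict.contains_empty]) h
  simpa [PySem.Dict.ofList, PySem.Dict.update] using this

-- the dict-valued flush of A equals pvFlushM on its item list
theorem pvFlushDict_eq (temp : PySem.Dict String Int) (r : PySem.Dict String Int)
    (hnd : temp.keys.Nodup) :
    (PySem.Dict.ofList (PySem.List.sorted temp.items (fun p => p.2))).keys.foldl
      (fun r k => r.insert k ((PySem.Dict.ofList (PySem.List.sorted temp.items (fun p => p.2))).getD k 0)) r
      = pvFlushM temp.items r := by
  have hperm : (PySem.List.sorted temp.items (fun p => p.2)).Perm temp.items :=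
    PySem.List.sorted_perm _ _ _
  have hnd' : ((PySem.List.sorted temp.items (fun p => p.2)).map Prod.fst).Nodup :=
    ((hperm.map Prod.fst).nodup_iff).2 hnd
  have hitems := pvItems_ofList _ hnd'
  simp only [pvFlushM]
  rw [show (PySem.Dict.ofList (PySem.List.sorted temp.items (fun p => p.2))).keys
      = (PySem.List.sorted temp.items (fun p => p.2)).map Prod.fst by
    simp [PySem.Dict.keys, hitems]]
  refine pvFoldl_map_fst_insert _ _ (fun q hq => ?_) r
  exact PySem.Dict.getD_of_mem_items _ (by rw [hitems]; exact hq) (by rw [PySem.Dict.keys, hitems]; exact hnd') 0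

-- absorbing an equal-hop run: no flush happens
theorem pvFoldM_run (cd : PySem.Dict String Int) (g : List (String × Int)) (h : Int)
    (temp : List (String × Int)) (r : PySem.Dict String Int)
    (hg : ∀ p ∈ g, ¬ h < p.2) :
    g.foldl (pvStepM cd) (h, temp, r) = (h, temp ++ g.map (pvPair cd), r) := by
  induction g generalizing temp with
  | nil => simp
  | cons p g ih =>
    simp only [List.foldl_cons, pvStepM, if_neg (hg p (by simp))]
    rw [ih _ (fun q hq => hg q (by simp [hq]))]
    simp

-- everything after the leading equal-hop run of a hop-sorted list has strictly larger hop
theorem pvDropWhile_gt (x : String × Int) (xs : List (String × Int))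
    (hp : (x :: xs).Pairwise (fun a b => a.2 ≤ b.2)) :
    ∀ p ∈ xs.dropWhile (fun y => y.2 == x.2), x.2 < p.2 := by
  intro p hp'
  rcases hrest : xs.dropWhile (fun y => y.2 == x.2) with _ | ⟨y, t⟩
  · simp [hrest] at hp'
  · have hy : (fun y : String × Int => y.2 == x.2) y = false := by
      have := List.head_dropWhile_not (fun y : String × Int => y.2 == x.2) (l := xs) (by simp [hrest])
      simpa [hrest] using this
    have hymem : y ∈ xs := (List.dropWhile_sublist _).mem (by rw [hrest]; exact List.mem_cons_self)
    have hxy : x.2 ≤ y.2 := (List.pairwise_cons.1 hp).1 y hymem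
    have hxylt : x.2 < y.2 := lt_of_le_of_ne hxy (fun he => by simp [← he] at hy)
    rw [hrest] at hp'
    rcases List.mem_cons.1 hp' with rfl | hpt
    · exact hxylt
    · have hyt : (y :: t).Pairwise (fun a b => a.2 ≤ b.2) := by
        have hxs : xs.Pairwise (fun a b : String × Int => a.2 ≤ b.2) := (List.pairwise_cons.1 hp).2
        have : (xs.dropWhile (fun y => y.2 == x.2)).Pairwise (fun a b : String × Int => a.2 ≤ b.2) :=
          hxs.sublist (List.dropWhile_sublist _)
        rwa [hrest] at this
      exact lt_of_lt_of_le hxylt ((List.pairwise_cons.1 hyt).1 p hpt)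

theorem pvFlushM_map (cd : PySem.Dict String Int) (g : List (String × Int)) (r : PySem.Dict String Int) :
    pvFlushM (g.map (pvPair cd)) r = pvFlushP cd g r := by
  simp only [pvFlushM, pvFlushP]
  rw [pvSorted_map (f := pvPair cd) (key := fun q => q.2), List.foldl_map]
  rfl

theorem pvFoldA_eq_model (cd th : PySem.Dict String Int) :
    ∀ (M : List (String × Int)) (temp : PySem.Dict String Int) (h : Int) (r : PySem.Dict String Int),
    (∀ p ∈ M, th.getD p.1 0 = p.2) →
    ((temp.keys ++ M.map Prod.fst).Nodup) →
    ((M.map Prod.fst).foldl (pvStepA cd th) (h, temp, r)).2.2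
      = (M.foldl (pvStepM cd) (h, temp.items, r)).2.2 := by
  intro M
  induction M with
  | nil => intro temp h r _ _; rfl
  | cons p M ih =>
    intro temp h r hlook hnd
    have hp : th.getD p.1 0 = p.2 := hlook p (by simp)
    have hndk : temp.keys.Nodup := (List.nodup_append.1 hnd).1
    simp only [List.map_cons, List.foldl_cons, pvStepA, pvStepM, hp]
    by_cases hc : h < p.2
    · rw [if_pos hc, if_pos hc, pvFlushDict_eq temp r hndk]
      have hitems : ((PySem.Dict.empty : PySem.Dict String Int).insert p.1 (cd.getD p.1 0)).items
          = [pvPair cd p] := by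
        rw [PySem.Dict.items_insert_of_not_contains _ _ (by simp [PySem.Dict.contains_empty])]
        rfl
      rw [← hitems]
      refine ih _ _ _ (fun q hq => hlook q (by simp [hq])) ?_
      have hkeys : ((PySem.Dict.empty : PySem.Dict String Int).insert p.1 (cd.getD p.1 0)).keys
          = [p.1] := by
        rw [PySem.Dict.keys_insert_of_not_contains _ _ (by simp [PySem.Dict.contains_empty])]
        rfl
      rw [hkeys]
      exact hnd.sublist (List.sublist_append_right _ _)
    · rw [if_neg hc, if_neg hc]
      have hfresh : temp.contains p.1 = false := by
        rw [PySem.Dict.contains_eq_decide_mem_keys]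
        simp only [decide_eq_false_iff_not]
        intro hmem
        exact (List.disjoint_of_nodup_append hnd) hmem (by simp)
      have hitems : (temp.insert p.1 (cd.getD p.1 0)).items = temp.items ++ [pvPair cd p] :=
        PySem.Dict.items_insert_of_not_contains _ _ hfresh
      rw [← hitems]
      refine ih _ _ _ (fun q hq => hlook q (by simp [hq])) ?_
      rw [PySem.Dict.keys_insert_of_not_contains _ _ hfresh]
      simpa [List.append_assoc] using hnd

theorem pvFoldM_spec (cd : PySem.Dict String Int) :
    ∀ (n : Nat) (M : List (String × Int)) (h : Int) (temp : List (String × Int)) (r : PySem.Dict String Int),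
    M.length ≤ n → M.Pairwise (fun a b => a.2 ≤ b.2) → (∀ p ∈ M, h < p.2) →
    (M.foldl (pvStepM cd) (h, temp, r)).2.2
      = if M.isEmpty then r else pvSpecL cd M (pvFlushM temp r) := by
  intro n
  induction n with
  | zero =>
    intro M h temp r hlen _ _
    rw [List.length_eq_zero_iff.1 (Nat.le_zero.1 hlen)]
    rfl
  | succ n ih =>
    intro M h temp r hlen hpw hgt
    match M with
    | [] => rfl
    | x :: xs =>
      have hsplit := List.takeWhile_append_dropWhile (p := fun y : String × Int => y.2 == x.2) (l := xs)
      simp only [List.foldl_cons, pvStepM, if_pos (hgt x (by simp))]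
      conv_lhs => rw [← hsplit, List.foldl_append]
      rw [pvFoldM_run cd (xs.takeWhile (fun y : String × Int => y.2 == x.2)) x.2 [pvPair cd x]
        (pvFlushM temp r) (fun p hp => by
          have := List.mem_takeWhile_imp hp
          simp only [beq_iff_eq] at this
          omega)]
      simp only [List.isEmpty_cons, Bool.false_eq_true, if_false]
      conv_rhs => rw [pvSpecL]
      rcases hrest : xs.dropWhile (fun y : String × Int => y.2 == x.2) with _ | ⟨y, t⟩
      · simp
      · have hpwxs : xs.Pairwise (fun a b : String × Int => a.2 ≤ b.2) := (List.pairwise_cons.1 hpw).2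
        have hlen' : (y :: t).length ≤ n := by
          have h1 : (xs.dropWhile (fun y : String × Int => y.2 == x.2)).length ≤ xs.length :=
            List.length_dropWhile_le _ _
          rw [hrest] at h1
          simp only [List.length_cons] at hlen h1 ⊢
          omega
        have hgt' : ∀ p ∈ (y :: t), x.2 < p.2 := fun p hp =>
          pvDropWhile_gt x xs hpw p (by rw [hrest]; exact hp)
        have hpw' : (y :: t).Pairwise (fun a b : String × Int => a.2 ≤ b.2) := by
          have := hpwxs.sublist (List.dropWhile_sublist (fun y : String × Int => y.2 == x.2))
          rwa [hrest] at this
        rw [ih _ _ _ _ hlen' hpw' hgt']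
        rw [show [pvPair cd x] ++ (xs.takeWhile (fun y : String × Int => y.2 == x.2)).map (pvPair cd)
            = (x :: xs.takeWhile (fun y : String × Int => y.2 == x.2)).map (pvPair cd) by simp,
          pvFlushM_map]

theorem pvFoldM_top (cd : PySem.Dict String Int) (x : String × Int) (xs : List (String × Int))
    (r : PySem.Dict String Int) (hpw : (x :: xs).Pairwise (fun a b => a.2 ≤ b.2)) :
    ((x :: xs).foldl (pvStepM cd) (x.2, [], r)).2.2 = pvSpecL cd (x :: xs) r := by
  have hsplit := List.takeWhile_append_dropWhile (p := fun y : String × Int => y.2 == x.2) (l := xs)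
  simp only [List.foldl_cons, pvStepM, if_neg (lt_irrefl x.2), List.nil_append]
  conv_lhs => rw [← hsplit, List.foldl_append]
  rw [pvFoldM_run cd (xs.takeWhile (fun y : String × Int => y.2 == x.2)) x.2 [pvPair cd x]
    r (fun p hp => by
      have := List.mem_takeWhile_imp hp
      simp only [beq_iff_eq] at this
      omega)]
  conv_rhs => rw [pvSpecL]
  rcases hrest : xs.dropWhile (fun y : String × Int => y.2 == x.2) with _ | ⟨y, t⟩
  · simp
  · have hpwxs : xs.Pairwise (fun a b : String × Int => a.2 ≤ b.2) := (List.pairwise_cons.1 hpw).2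
    have hgt' : ∀ p ∈ (y :: t), x.2 < p.2 := fun p hp =>
      pvDropWhile_gt x xs hpw p (by rw [hrest]; exact hp)
    have hpw' : (y :: t).Pairwise (fun a b : String × Int => a.2 ≤ b.2) := by
      have := hpwxs.sublist (List.dropWhile_sublist (fun y : String × Int => y.2 == x.2))
      rwa [hrest] at this
    rw [pvFoldM_spec cd (y :: t).length _ _ _ _ le_rfl hpw' hgt']
    rw [show [pvPair cd x] ++ (xs.takeWhile (fun y : String × Int => y.2 == x.2)).map (pvPair cd)
        = (x :: xs.takeWhile (fun y : String × Int => y.2 == x.2)).map (pvPair cd) by simp,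
      pvFlushM_map]

theorem pvKeys_ofList (ls : List (String × Int)) :
    (PySem.Dict.ofList ls).keys = PySem.Set.ofList (ls.map Prod.fst) := by
  have := PySem.Dict.keys_foldl_insert_key (ν := Int) (l := ls) (key := Prod.fst)
    (f := fun _ p => p.2) (d := PySem.Dict.empty)
  simpa [PySem.Dict.ofList, PySem.Dict.update, PySem.Dict.keys_empty,
    PySem.Set.update_empty] using this

-- ===== new B-side lemmas: one lex sort = runwise value-sort of the hop sort =====

theorem pvInsertBy_pass {α : Type} (lt : α → α → Bool) (x : α) (A B : List α)
    (h : ∀ a ∈ A, lt x a = false) :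
    PySem.List.insertBy lt x (A ++ B) = A ++ PySem.List.insertBy lt x B := by
  induction A with
  | nil => rfl
  | cons a A ih =>
    simp only [List.cons_append, PySem.List.insertBy, h a (by simp)]
    simp [ih (fun a ha => h a (by simp [ha]))]

theorem pvInsertBy_boundary {α : Type} (lt : α → α → Bool) (x : α) (A B : List α)
    (h : ∀ b ∈ B, lt x b = true) :
    PySem.List.insertBy lt x (A ++ B) = PySem.List.insertBy lt x A ++ B := by
  induction A with
  | nil =>
    cases B with
    | nil => rfl
    | cons b B => simp [PySem.List.insertBy, h b (by simp)]
  | cons a A ih =>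
    simp only [List.cons_append, PySem.List.insertBy]
    by_cases ha : lt x a = true
    · simp [ha]
    · simp [eq_false_of_ne_true ha, ih]

theorem pvInsertBy_congr {α : Type} (lt lt' : α → α → Bool) (x : α) (A : List α)
    (h : ∀ y ∈ A, lt x y = lt' x y) :
    PySem.List.insertBy lt x A = PySem.List.insertBy lt' x A := by
  induction A with
  | nil => rfl
  | cons a A ih =>
    simp only [PySem.List.insertBy, h a (by simp)]
    by_cases ha : lt' x a = true
    · simp [ha]
    · simp [eq_false_of_ne_true ha, ih (fun y hy => h y (by simp [hy]))]

theorem pvSorted_snoc (A : List (String × Int)) (x : String × Int) (key : (String × Int) → Int) :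
    PySem.List.sorted (A ++ [x]) key
      = PySem.List.insertBy (fun a b => decide (key a < key b)) x (PySem.List.sorted A key) := by
  rw [PySem.List.sorted_eq_foldl_insertBy, PySem.List.sorted_eq_foldl_insertBy, List.foldl_append]
  rfl

theorem pvTakeWhile_all {α : Type} (p : α → Bool) (A B : List α) (h : ∀ a ∈ A, p a = true) :
    (A ++ B).takeWhile p = A ++ B.takeWhile p ∧ (A ++ B).dropWhile p = B.dropWhile p := by
  induction A with
  | nil => simp
  | cons a A ih =>
    have := ih (fun a ha => h a (by simp [ha]))
    simp [h a (by simp), this.1, this.2]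

theorem pvTakeWhile_none {α : Type} (p : α → Bool) (C : List α)
    (h : ∀ c ∈ C, p c = false) : C.takeWhile p = [] ∧ C.dropWhile p = C := by
  cases C with
  | nil => simp
  | cons c C => simp [h c (by simp)]

theorem pvMem_runSort (cd : PySem.Dict String Int) :
    ∀ (n : Nat) (L : List (String × Int)) (p : String × Int),
    L.length ≤ n → p ∈ pvRunSort cd L → p ∈ L := by
  intro n
  induction n with
  | zero =>
    intro L p hlen hp
    rw [List.length_eq_zero_iff.1 (Nat.le_zero.1 hlen)] at hp ⊢
    simpa [pvRunSort] using hp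
  | succ n ih =>
    intro L p hlen hp
    match L with
    | [] => simpa [pvRunSort] using hp
    | x :: xs =>
      rw [pvRunSort] at hp
      rcases List.mem_append.1 hp with h1 | h2
      · have := (PySem.List.mem_sorted _ _ _ _).1 h1
        rcases List.mem_cons.1 this with rfl | htw
        · simp
        · exact List.mem_cons_of_mem _ ((List.takeWhile_sublist _).mem htw)
      · have hlen' : (xs.dropWhile (fun y => y.2 == x.2)).length ≤ n := by
          have := List.length_dropWhile_le (fun y : String × Int => y.2 == x.2) xs
          simp only [List.length_cons] at hlen
          omega
        exact List.mem_cons_of_mem _ ((List.dropWhile_sublist _).mem (ih _ p hlen' h2))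

theorem pvRunSort_nil (cd : PySem.Dict String Int) : pvRunSort cd [] = [] := by
  rw [pvRunSort]

theorem pvRunSort_single (cd : PySem.Dict String Int) (x : String × Int) :
    pvRunSort cd [x] = [x] := by
  rw [pvRunSort]
  simp only [List.takeWhile_nil, List.dropWhile_nil, pvRunSort_nil, List.append_nil]
  rfl

-- inserting one element commutes with runwise value-sorting, on a hop-sorted list
theorem pvInsertRun (cd : PySem.Dict String Int) :
    ∀ (n : Nat) (S : List (String × Int)) (x : String × Int),
    S.length ≤ n → S.Pairwise (fun a b => a.2 ≤ b.2) →
    PySem.List.insertBy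
        (fun a b => decide (a.2 < b.2) || (!decide (b.2 < a.2) && decide (cd.getD a.1 0 < cd.getD b.1 0)))
        x (pvRunSort cd S)
      = pvRunSort cd (PySem.List.insertBy (fun a b => decide (a.2 < b.2)) x S) := by
  intro n
  induction n with
  | zero =>
    intro S x hlen _
    rw [List.length_eq_zero_iff.1 (Nat.le_zero.1 hlen)]
    simp only [pvRunSort_nil, PySem.List.insertBy, pvRunSort_single]
  | succ n ih =>
    intro S x hlen hpw
    match S with
    | [] => simp only [pvRunSort_nil, PySem.List.insertBy, pvRunSort_single]
    | y :: ys =>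
      set lex := (fun a b : String × Int =>
        decide (a.2 < b.2) || (!decide (b.2 < a.2) && decide (cd.getD a.1 0 < cd.getD b.1 0))) with hlexdef
      set tw := ys.takeWhile (fun z => z.2 == y.2) with htwdef
      set rest := ys.dropWhile (fun z => z.2 == y.2) with hrestdef
      have hrun : ∀ p ∈ (y :: tw), p.2 = y.2 := by
        intro p hp
        rcases List.mem_cons.1 hp with rfl | hptw
        · rfl
        · simpa using List.mem_takeWhile_imp hptw
      have hrest_gt : ∀ p ∈ rest, y.2 < p.2 := pvDropWhile_gt y ys hpw
      have hpw_rest : rest.Pairwise (fun a b : String × Int => a.2 ≤ b.2) :=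
        ((List.pairwise_cons.1 hpw).2).sublist (List.dropWhile_sublist _)
      have hlen_rest : rest.length ≤ n := by
        have h0 := List.length_dropWhile_le (fun z : String × Int => z.2 == y.2) ys
        rw [← hrestdef] at h0
        simp only [List.length_cons] at hlen
        omega
      rcases lt_trichotomy x.2 y.2 with hx | hx | hx
      · -- x strictly below the first run: it lands in front on both sides
        have hrhs : PySem.List.insertBy (fun a b : String × Int => decide (a.2 < b.2)) x (y :: ys)
            = x :: y :: ys := by
          simp [PySem.List.insertBy, hx]
        rw [hrhs]
        have hL : pvRunSort cd (x :: y :: ys)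
            = PySem.List.sorted [x] (fun p => cd.getD p.1 0) ++ pvRunSort cd (y :: ys) := by
          rw [pvRunSort]
          have hhead : (fun z : String × Int => z.2 == x.2) y = false := by
            simp only [beq_eq_false_iff_ne]; omega
          simp [hhead]
        rw [hL]
        have hLrun : pvRunSort cd (y :: ys)
            = PySem.List.sorted (y :: tw) (fun p => cd.getD p.1 0) ++ pvRunSort cd rest := by
          rw [pvRunSort]
        rw [hLrun]
        rcases hsort : PySem.List.sorted (y :: tw) (fun p => cd.getD p.1 0) with _ | ⟨z, zs⟩
        · exact absurd (PySem.List.sorted_eq_nil_iff _ _ _ |>.1 hsort) (by simp)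
        have hz : z.2 = y.2 := by
          have : z ∈ (y :: tw) := (PySem.List.mem_sorted _ _ _ _).1 (by rw [hsort]; simp)
          exact hrun z this
        have hlexz : lex x z = true := by
          rw [hlexdef]
          simp only [Bool.or_eq_true, decide_eq_true_eq]
          left; omega
        simp [PySem.List.insertBy, hlexz, PySem.List.sorted]
      · -- x joins the first run
        have hrhs : PySem.List.insertBy (fun a b : String × Int => decide (a.2 < b.2)) x (y :: ys)
            = (y :: tw) ++ x :: rest := by
          have h1 : (y :: ys) = (y :: tw) ++ rest := by
            simp [htwdef, hrestdef, List.takeWhile_append_dropWhile]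
          rw [h1, pvInsertBy_pass _ _ _ _ (fun a ha => by
            have := hrun a ha
            simp only [decide_eq_false_iff_not]
            omega)]
          congr 1
          cases hres : rest with
          | nil => rfl
          | cons z zs =>
            have hz : y.2 < z.2 := hrest_gt z (by rw [hres]; simp)
            simp [PySem.List.insertBy, show x.2 < z.2 by omega]
        rw [hrhs]
        -- runs of (y :: tw) ++ x :: rest : first run is y :: tw ++ [x], tail is rest
        have hLrhs : pvRunSort cd ((y :: tw) ++ x :: rest)
            = PySem.List.sorted ((y :: tw) ++ [x]) (fun p => cd.getD p.1 0) ++ pvRunSort cd rest := by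
          simp only [List.cons_append]
          rw [pvRunSort]
          have htall : ∀ a ∈ tw, (fun z : String × Int => z.2 == y.2) a = true := by
            intro a ha; rw [htwdef] at ha
            exact List.mem_takeWhile_imp (p := fun z : String × Int => z.2 == y.2) (l := ys) ha
          have h2 := pvTakeWhile_all (fun z : String × Int => z.2 == y.2) tw (x :: rest) htall
          have hxok : (fun z : String × Int => z.2 == y.2) x = true := by simp [hx]
          have hrestnone := pvTakeWhile_none (fun z : String × Int => z.2 == y.2) rest
            (fun c hc => by
              have := hrest_gt c hc
              simp only [beq_eq_false_iff_ne]; omega)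
          simp only [h2.1, h2.2, List.takeWhile_cons, List.dropWhile_cons, hxok,
            hrestnone.1, hrestnone.2]
          simp
        rw [hLrhs]
        -- left side: insert into sorted run ++ pvRunSort rest
        rw [pvRunSort]
        rw [pvInsertBy_boundary lex x _ (pvRunSort cd rest) (fun b hb => by
          have hbmem : b ∈ rest := pvMem_runSort cd rest.length rest b le_rfl hb
          have := hrest_gt b hbmem
          rw [hlexdef]
          simp only [Bool.or_eq_true, decide_eq_true_eq]
          left; omega)]
        congr 1
        rw [pvSorted_snoc]
        refine pvInsertBy_congr lex (fun a b => decide (cd.getD a.1 0 < cd.getD b.1 0)) x _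
          (fun z hz => ?_)
        have hz2 : z.2 = y.2 := hrun z ((PySem.List.mem_sorted _ _ _ _).1 hz)
        simp [hlexdef, show ¬ (x.2 < z.2) by omega, show ¬ (z.2 < x.2) by omega]
      · -- x lies beyond the first run
        have hrhs : PySem.List.insertBy (fun a b : String × Int => decide (a.2 < b.2)) x (y :: ys)
            = (y :: tw) ++ PySem.List.insertBy (fun a b : String × Int => decide (a.2 < b.2)) x rest := by
          have h1 : (y :: ys) = (y :: tw) ++ rest := by
            simp [htwdef, hrestdef, List.takeWhile_append_dropWhile]
          rw [h1, pvInsertBy_pass _ _ _ _ (fun a ha => by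
            have := hrun a ha
            simp only [decide_eq_false_iff_not]
            omega)]
        rw [hrhs]
        have hLrhs : pvRunSort cd ((y :: tw) ++ PySem.List.insertBy (fun a b : String × Int => decide (a.2 < b.2)) x rest)
            = PySem.List.sorted (y :: tw) (fun p => cd.getD p.1 0)
              ++ pvRunSort cd (PySem.List.insertBy (fun a b : String × Int => decide (a.2 < b.2)) x rest) := by
          simp only [List.cons_append]
          rw [pvRunSort]
          have htall : ∀ a ∈ tw, (fun z : String × Int => z.2 == y.2) a = true := by
            intro a ha; rw [htwdef] at ha
            exact List.mem_takeWhile_imp (p := fun z : String × Int => z.2 == y.2) (l := ys) ha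
          have h2 := pvTakeWhile_all (fun z : String × Int => z.2 == y.2) tw
            (PySem.List.insertBy (fun a b : String × Int => decide (a.2 < b.2)) x rest) htall
          have hnone := pvTakeWhile_none (fun z : String × Int => z.2 == y.2)
            (PySem.List.insertBy (fun a b : String × Int => decide (a.2 < b.2)) x rest)
            (fun c hc => by
              rcases (PySem.List.mem_insertBy _ _ _ _).1 hc with rfl | hcr
              · simp only [beq_eq_false_iff_ne]; omega
              · have := hrest_gt c hcr
                simp only [beq_eq_false_iff_ne]; omega)
          simp only [h2.1, h2.2, hnone.1, hnone.2]
          simp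
        rw [hLrhs]
        rw [pvRunSort]
        rw [pvInsertBy_pass lex x _ _ (fun a ha => by
          have ha2 : a.2 = y.2 := hrun a ((PySem.List.mem_sorted _ _ _ _).1 ha)
          rw [hlexdef]
          simp only [Bool.or_eq_false_iff, Bool.and_eq_false_iff, Bool.not_eq_false']
          constructor
          · simp; omega
          · left; simp; omega)]
        rw [ih rest x hlen_rest hpw_rest]

-- the composite-key sort IS the runwise value-sort of the hop sort
theorem pvSorted2_eq_runSort (cd : PySem.Dict String Int) (I : List (String × Int)) :
    PySem.List.sorted2 I (fun p => p.2) (fun p => cd.getD p.1 0)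
      = pvRunSort cd (PySem.List.sorted I (fun p => p.2)) := by
  induction I using List.reverseRecOn with
  | nil =>
    rw [show PySem.List.sorted ([] : List (String × Int)) (fun p => p.2) = [] from rfl, pvRunSort_nil]
    rfl
  | append_singleton I x ih =>
    have hlhs : PySem.List.sorted2 (I ++ [x]) (fun p => p.2) (fun p => cd.getD p.1 0)
        = PySem.List.insertBy
            (fun a b => decide (a.2 < b.2) || (!decide (b.2 < a.2) && decide (cd.getD a.1 0 < cd.getD b.1 0)))
            x (PySem.List.sorted2 I (fun p => p.2) (fun p => cd.getD p.1 0)) := by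
      show (I ++ [x]).foldl _ [] = _
      rw [List.foldl_append]
      rfl
    rw [hlhs, ih, pvSorted_snoc,
      pvInsertRun cd (PySem.List.sorted I (fun p => p.2)).length _ x le_rfl
        (PySem.List.sorted_pairwise _ _)]

-- filtering the max hop out of the runwise sort and inserting = flush-all-but-last-run
theorem pvSpecL_eq_filter (cd : PySem.Dict String Int) :
    ∀ (n : Nat) (L : List (String × Int)) (M : Int) (r : PySem.Dict String Int),
    L.length ≤ n → L.Pairwise (fun a b => a.2 ≤ b.2) → (∀ p ∈ L, p.2 ≤ M) →
    M ∈ L.map Prod.snd →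
    ((pvRunSort cd L).filter (fun p => p.2 != M)).foldl
        (fun r p => r.insert p.1 (cd.getD p.1 0)) r
      = pvSpecL cd L r := by
  intro n
  induction n with
  | zero =>
    intro L M r hlen _ _ hmem
    rw [List.length_eq_zero_iff.1 (Nat.le_zero.1 hlen)] at hmem
    simp at hmem
  | succ n ih =>
    intro L M r hlen hpw hle hmem
    match L with
    | [] => simp at hmem
    | x :: xs =>
      rw [pvRunSort, List.filter_append, List.foldl_append]
      conv_rhs => rw [pvSpecL]
      set tw := xs.takeWhile (fun z => z.2 == x.2) with htwdef
      have hrun : ∀ p ∈ (x :: tw), p.2 = x.2 := by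
        intro p hp
        rcases List.mem_cons.1 hp with rfl | hptw
        · rfl
        · simpa using List.mem_takeWhile_imp hptw
      rcases hrest : xs.dropWhile (fun y : String × Int => y.2 == x.2) with _ | ⟨y, t⟩
      · -- single run: its hop is the maximum, nothing is emitted
        have hM : M = x.2 := by
          rcases List.mem_map.1 hmem with ⟨p, hp, rfl⟩
          rcases List.mem_cons.1 hp with rfl | hpxs
          · rfl
          · have : p ∈ tw := by
              rw [← List.takeWhile_append_dropWhile (p := fun y : String × Int => y.2 == x.2) (l := xs), hrest] at hpxs
              simpa [htwdef] using hpxs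
            exact hrun p (by simp [this])
        have hfilter : (PySem.List.sorted (x :: tw) (fun p => cd.getD p.1 0)).filter
            (fun p => p.2 != M) = [] := by
          rw [List.filter_eq_nil_iff]
          intro p hp
          have := hrun p ((PySem.List.mem_sorted _ _ _ _).1 hp)
          simp [this, hM]
        rw [hfilter]
        simp [pvRunSort]
      · -- at least one later run: this run's hop is below the maximum, emit it whole
        have hgt' : ∀ p ∈ (y :: t), x.2 < p.2 := fun p hp =>
          pvDropWhile_gt x xs hpw p (by rw [hrest]; exact hp)
        have hxM : x.2 ≠ M := by
          have h1 : x.2 < y.2 := hgt' y (by simp)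
          have h2 : y.2 ≤ M := hle y
            (List.mem_cons_of_mem _ ((List.dropWhile_sublist _).mem (by rw [hrest]; exact List.mem_cons_self)))
          omega
        have hfilter : (PySem.List.sorted (x :: tw) (fun p => cd.getD p.1 0)).filter
            (fun p => p.2 != M) = PySem.List.sorted (x :: tw) (fun p => cd.getD p.1 0) := by
          rw [List.filter_eq_self]
          intro p hp
          have := hrun p ((PySem.List.mem_sorted _ _ _ _).1 hp)
          simp [this]
          omega
        rw [hfilter]
        have hfold : (PySem.List.sorted (x :: tw) (fun p => cd.getD p.1 0)).foldl
            (fun r p => r.insert p.1 (cd.getD p.1 0)) r = pvFlushP cd (x :: tw) r := rfl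
        rw [hfold]
        simp only [List.isEmpty_cons, Bool.false_eq_true, if_false]
        have hpw' : (y :: t).Pairwise (fun a b : String × Int => a.2 ≤ b.2) := by
          have := ((List.pairwise_cons.1 hpw).2).sublist
            (List.dropWhile_sublist (fun y : String × Int => y.2 == x.2))
          rwa [hrest] at this
        have hlen' : (y :: t).length ≤ n := by
          have h1 : (xs.dropWhile (fun y : String × Int => y.2 == x.2)).length ≤ xs.length :=
            List.length_dropWhile_le _ _
          rw [hrest] at h1
          simp only [List.length_cons] at hlen h1 ⊢
          omega
        have hle' : ∀ p ∈ (y :: t), p.2 ≤ M := fun p hp =>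
          hle p (List.mem_cons_of_mem _ ((List.dropWhile_sublist _).mem (by rw [hrest]; exact hp)))
        have hmem' : M ∈ (y :: t).map Prod.snd := by
          rcases List.mem_map.1 hmem with ⟨p, hp, rfl⟩
          rcases List.mem_cons.1 hp with rfl | hpxs
          · exact absurd rfl hxM
          · rw [← List.takeWhile_append_dropWhile (p := fun y : String × Int => y.2 == x.2) (l := xs), hrest] at hpxs
            rcases List.mem_append.1 hpxs with htk | hdr
            · have := List.mem_takeWhile_imp htk
              simp only [beq_iff_eq] at this
              exact absurd this.symm (by simpa using hxM)
            · exact List.mem_map.2 ⟨p, hdr, rfl⟩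
        exact ih (y :: t) M _ hlen' hpw' hle' hmem'

theorem pvFoldlIf (cd : PySem.Dict String Int) (M : Int) :
    ∀ (L : List (String × Int)) (r : PySem.Dict String Int),
    L.foldl (fun r p => if p.2 != M then r.insert p.1 (cd.getD p.1 0) else r) r
      = (L.filter (fun p => p.2 != M)).foldl (fun r p => r.insert p.1 (cd.getD p.1 0)) r := by
  intro L
  induction L with
  | nil => intro r; rfl
  | cons a L ih =>
    intro r
    simp only [List.foldl_cons, List.filter_cons]
    by_cases h : (a.2 != M) = true
    · rw [if_pos h, if_pos h, List.foldl_cons]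
      exact ih _
    · rw [if_neg h, if_neg h]
      exact ih _

theorem pvMain (centroid targethop : List (String × Int)) (hne : targethop ≠ []) :
    sorted_hop_py centroid targethop = sorted_hop_py_alt centroid targethop := by
  simp only [sorted_hop_py, sorted_hop_py_alt]
  have hkeys : (PySem.Dict.ofList targethop).keys = PySem.Set.ofList (targethop.map Prod.fst) :=
    pvKeys_ofList targethop
  have hkeysnd : (PySem.Dict.ofList targethop).keys.Nodup := PySem.Dict.nodup_keys_ofList targethop
  have hitemsne : (PySem.Dict.ofList targethop).items ≠ [] := by
    intro h
    rcases List.exists_cons_of_ne_nil hne with ⟨q, ts, rfl⟩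
    have : (PySem.Dict.ofList (q :: ts)).keys = [] := by simp [PySem.Dict.keys, h]
    rw [hkeys, List.map_cons, PySem.Set.ofList_cons] at this
    exact absurd this (by simp)
  have hperm : (PySem.List.sorted (PySem.Dict.ofList targethop).items (fun p => p.2)).Perm
      (PySem.Dict.ofList targethop).items := PySem.List.sorted_perm _ _ _
  set L := PySem.List.sorted (PySem.Dict.ofList targethop).items (fun p => p.2) with hLdef
  have hLne : L ≠ [] := by
    rw [hLdef, Ne, PySem.List.sorted_eq_nil_iff]
    exact hitemsne
  have hndk : (L.map Prod.fst).Nodup := by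
    refine ((hperm.map Prod.fst).nodup_iff).2 ?_
    simpa [PySem.Dict.keys] using hkeysnd
  have hitems : (PySem.Dict.ofList L).items = L := pvItems_ofList L hndk
  have hthkeys : (PySem.Dict.ofList L).keys = L.map Prod.fst := by simp [PySem.Dict.keys, hitems]
  have hthnd : (PySem.Dict.ofList L).keys.Nodup := PySem.Dict.nodup_keys_ofList L
  have hlook : ∀ p ∈ L, (PySem.Dict.ofList L).getD p.1 0 = p.2 := by
    intro p hp
    exact PySem.Dict.getD_of_mem_items _ (by rw [hitems]; simpa using hp) hthnd 0
  have hpwL : L.Pairwise (fun a b => a.2 ≤ b.2) :=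
    PySem.List.sorted_pairwise (PySem.Dict.ofList targethop).items (fun p => p.2)
  rcases List.exists_cons_of_ne_nil hLne with ⟨x, xs, hLx⟩
  -- ===== A side =====
  have hkeysLne : (PySem.Dict.ofList L).keys ≠ [] := by rw [hthkeys, hLx]; simp
  rcases hmk : PySem.List.min? (PySem.Dict.ofList L).keys
      (fun k => (PySem.Dict.ofList L).getD k 0) with _ | m
  · exact absurd ((PySem.List.min?_eq_none_iff _ _).1 hmk) hkeysLne
  have hminhop : (PySem.Dict.ofList L).getD m 0 = x.2 := by
    have hmmem : m ∈ (PySem.Dict.ofList L).keys := PySem.List.min?_mem hmk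
    rw [hthkeys] at hmmem
    rcases List.mem_map.1 hmmem with ⟨p, hpL, rfl⟩
    have h1 : (PySem.Dict.ofList L).getD p.1 0 = p.2 := hlook p hpL
    have h2 : (PySem.Dict.ofList L).getD p.1 0 ≤ (PySem.Dict.ofList L).getD x.1 0 :=
      PySem.List.min?_isMin hmk x.1 (by rw [hthkeys, hLx]; simp)
    rw [hlook x (by rw [hLx]; simp)] at h2
    have h3 : x.2 ≤ p.2 := by
      rw [hLx] at hpL hpwL
      rcases List.mem_cons.1 hpL with rfl | hpxs
      · exact le_refl _
      · exact (List.pairwise_cons.1 hpwL).1 p hpxs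
    omega
  have hAside : ((PySem.Dict.ofList L).keys.foldl
        (pvStepA (PySem.Dict.ofList centroid) (PySem.Dict.ofList L))
        ((PySem.Dict.ofList L).getD m 0, PySem.Dict.empty, PySem.Dict.empty)).2.2
      = pvSpecL (PySem.Dict.ofList centroid) L PySem.Dict.empty := by
    rw [hminhop, hthkeys]
    have := pvFoldA_eq_model (PySem.Dict.ofList centroid) (PySem.Dict.ofList L) L
      PySem.Dict.empty x.2 PySem.Dict.empty hlook (by simpa [PySem.Dict.keys_empty] using hndk)
    rw [this]
    rw [show (PySem.Dict.empty : PySem.Dict String Int).items = [] from rfl]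
    rw [hLx]
    exact pvFoldM_top _ x xs _ (hLx ▸ hpwL)
  -- ===== B side =====
  have hvals : (PySem.Dict.ofList targethop).values
      = (PySem.Dict.ofList targethop).items.map Prod.snd := rfl
  have hvalsne : (PySem.Dict.ofList targethop).values ≠ [] := by
    rw [hvals]
    simpa using hitemsne
  rcases hmx : PySem.List.max? (PySem.Dict.ofList targethop).values (fun v => v) with _ | M
  · exact absurd ((PySem.List.max?_eq_none_iff _ _).1 hmx) hvalsne
  have hMle : ∀ p ∈ L, p.2 ≤ M := by
    intro p hp
    have hpI : p ∈ (PySem.Dict.ofList targethop).items := hperm.mem_iff.1 hp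
    exact PySem.List.max?_isMax hmx p.2 (by rw [hvals]; exact List.mem_map.2 ⟨p, hpI, rfl⟩)
  have hMmem : M ∈ L.map Prod.snd := by
    have := PySem.List.max?_mem hmx
    rw [hvals] at this
    rcases List.mem_map.1 this with ⟨p, hpI, rfl⟩
    exact List.mem_map.2 ⟨p, hperm.mem_iff.2 hpI, rfl⟩
  have hBfold : (PySem.List.sorted2 (PySem.Dict.ofList targethop).items (fun p => p.2)
        (fun p => (PySem.Dict.ofList centroid).getD p.1 0)).foldl
        (fun r p => if p.2 != M then r.insert p.1 ((PySem.Dict.ofList centroid).getD p.1 0) else r)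
        PySem.Dict.empty
      = pvSpecL (PySem.Dict.ofList centroid) L PySem.Dict.empty := by
    rw [pvSorted2_eq_runSort, ← hLdef, pvFoldlIf]
    exact pvSpecL_eq_filter (PySem.Dict.ofList centroid) L.length L M _ le_rfl hpwL hMle hMmem
  simp only [hAside, hBfold]

-- ===== VERDICT (by name: the statement is the Claim_ definition above) =====
theorem sorted_hop_py_spec : Claim_equal_sorted_hop_py := by
  intro centroid targethop _ hpre
  exact pvMain centroid targethop hpre.1
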